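-- pv_equiv track=rewrite | github.com/vedk21/data_structure_playground | Arrays/Rearrangement/Pattern/index_at_element_pattern_solution.py | arrangeUsingIteration
-- ===== SOURCE A (Python) =====
-- def arrangeUsingIteration(arr, size):
--     for i in range(size):
--         # check if current element is not -1 or i
--         if arr[i] != -1 and arr[i] != i:
--             # store current element in temp variable
--             x = arr[i]
--
--             # check if element is out of array bound
--             if x >= 0 and x < size:
--                 # check until desired place(x) is not -1 or x
--                 while(arr[x] != -1 and arr[x] != x):
--                     # store current arr[x] in temp variable
--                     y = arr[x]
--
--                     # save x to arr[x] now
--                     arr[x] = x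
--
--                     # check if element is out of array bound
--                     if y >= 0 and y < size:
--                         # assign x as y, to make sure y also goes to its desired location index
--                         x = y
--                     else:
--                         break
--
--                 # place x to its correct position (this executes if arr[x] == -1 or x)
--                 arr[x] = x
--
--                 # check if arr[i] has correct element, if not save -1
--                 if arr[i] != i:
--                     arr[i] = -1
--
--             else:
--                 arr[i] = -1
--
--     return arr
-- ===== SOURCE B (Python) =====
-- def arrangeUsingIteration(arr, size):
--     # Pass 1: record which values in [0, size) occur in arr[:size].
--     present = set()
--     for i in range(size):
--         v = arr[i]
--         if 0 <= v < size:
--             present.add(v)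
--     # Pass 2: rewrite in place: index i keeps i if the value i occurs, else -1.
--     for i in range(size):
--         arr[i] = i if i in present else -1
--     return arr
-- ===== Notes on version B (the rewrite author's own statement) =====
-- stated objective: simpler
-- what changed: Replaces the in-place cycle/chain-following (inner while that swaps values toward their target slots) by a two-pass presence-marking rewrite: first collect every value 0<=v<size occurring in arr[:size] into a set, then set arr[i]=i if i is in that set else -1.
import Mathlib
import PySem

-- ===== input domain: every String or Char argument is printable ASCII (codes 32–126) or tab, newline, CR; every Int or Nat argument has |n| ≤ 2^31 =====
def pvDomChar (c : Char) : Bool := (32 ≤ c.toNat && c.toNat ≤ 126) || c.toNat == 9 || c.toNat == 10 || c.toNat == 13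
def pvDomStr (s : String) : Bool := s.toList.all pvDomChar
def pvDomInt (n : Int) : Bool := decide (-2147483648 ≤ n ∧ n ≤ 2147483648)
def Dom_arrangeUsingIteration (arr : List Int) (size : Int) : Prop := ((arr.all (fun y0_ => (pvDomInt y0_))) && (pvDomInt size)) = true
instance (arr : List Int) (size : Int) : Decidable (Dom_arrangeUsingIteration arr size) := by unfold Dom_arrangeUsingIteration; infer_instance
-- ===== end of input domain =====

-- B replaces A's in-place chain-following rearrangement (inner while loop that
-- moves each value toward its target slot) by a two-pass presence-marking
-- rewrite: collect the values 0 <= v < size occurring in arr[:size], then set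
-- arr[i] = i if i was collected, else -1.  Both Pythons mutate `arr` in place
-- and return it; the equivalence proved here is about the returned value.

-- ===== PORT A =====
-- The Python `while` loop is ported with fuel `size.toNat`: each iteration of
-- the loop fixes a fresh slot among the `size` slots, so under
-- Pre_arrangeUsingIteration the fuel is never exhausted before the loop
-- condition goes false (shown by the Ucount lemmas below).  All indices read
-- are nonnegative and in range under Pre_arrangeUsingIteration, so
-- `List.getD _ 0` is exact there.
def chaseA (size : Int) : Nat → List Int → Int → List Int × Int
  | 0, arr, x => (arr, x)
  | Nat.succ fuel, arr, x =>
    if arr.getD x.toNat 0 ≠ -1 ∧ arr.getD x.toNat 0 ≠ x then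
      let y := arr.getD x.toNat 0
      let arr1 := arr.set x.toNat x
      if 0 ≤ y ∧ y < size then chaseA size fuel arr1 y
      else (arr1, x)
    else (arr, x)

-- one iteration of the outer `for i in range(size)` loop
def stepA (size : Int) (arr : List Int) (i : Nat) : List Int :=
  if arr.getD i 0 ≠ -1 ∧ arr.getD i 0 ≠ (i : Int) then
    let x := arr.getD i 0
    if 0 ≤ x ∧ x < size then
      let p := chaseA size size.toNat arr x
      let arr2 := p.1.set p.2.toNat p.2
      if arr2.getD i 0 ≠ (i : Int) then arr2.set i (-1) else arr2
    else arr.set i (-1)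
  else arr

def arrangeUsingIteration (arr : List Int) (size : Int) : List Int :=
  (List.range size.toNat).foldl (stepA size) arr

-- ===== PORT B =====
def arrangeUsingIteration_alt (arr : List Int) (size : Int) : List Int :=
  let present := (List.range size.toNat).foldl
    (fun s i =>
      let v := arr.getD i 0
      if 0 ≤ v ∧ v < size then PySem.Set.add s v else s)
    (PySem.Set.empty)
  (List.range size.toNat).foldl
    (fun a i => a.set i (if PySem.Set.contains present (i : Int) then (i : Int) else -1)) arr

-- ===== PRECONDITION & SPEC =====
-- Exactly the inputs on which the Python A returns: if size > len(arr) the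
-- Python A hits an out-of-range read and raises IndexError (so does B).
def Pre_arrangeUsingIteration (arr : List Int) (size : Int) : Prop :=
  size ≤ (arr.length : Int)
instance (arr : List Int) (size : Int) : Decidable (Pre_arrangeUsingIteration arr size) := by
  unfold Pre_arrangeUsingIteration; infer_instance

def pvWitness_arrangeUsingIteration : List Int × Int := ([0, 2, -1, 5], 4)

def Spec_arrangeUsingIteration (arr : List Int) (size : Int) (out : List Int) : Prop := out = arrangeUsingIteration_alt arr size
instance (arr : List Int) (size : Int) (out : List Int) : Decidable (Spec_arrangeUsingIteration arr size out) := by unfold Spec_arrangeUsingIteration; infer_instance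

-- ===== CLAIM (what is proved, stated in full; the proofs are below) =====
def Claim_equal_arrangeUsingIteration : Prop := ∀ (arr : List Int) (size : Int), Dom_arrangeUsingIteration arr size → Pre_arrangeUsingIteration arr size → Spec_arrangeUsingIteration arr size (arrangeUsingIteration arr size)

-- ===== LEMMAS AND PROOFS =====

lemma getD_set' (l : List Int) (a : Nat) (b : Int) (j : Nat) :
    (l.set a b).getD j 0 = if j = a ∧ j < l.length then b else l.getD j 0 := by
  simp only [List.getD_eq_getElem?_getD, List.getElem?_set]
  by_cases h1 : a = j
  · subst h1
    by_cases h2 : a < l.length <;> simp [h2]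
  · simp only [if_neg h1]
    rw [if_neg (fun h => h1 h.1.symm)]

def Ucount (arr : List Int) : Nat → Nat
  | 0 => 0
  | m + 1 => Ucount arr m + (if arr.getD m 0 ≠ (m : Int) then 1 else 0)

lemma Ucount_le (arr : List Int) (m : Nat) : Ucount arr m ≤ m := by
  induction m with
  | zero => simp [Ucount]
  | succ m ih => simp only [Ucount]; split <;> omega

lemma Ucount_congr (a b : List Int) (m : Nat)
    (h : ∀ j, j < m → a.getD j 0 = b.getD j 0) : Ucount a m = Ucount b m := by
  induction m with
  | zero => rfl
  | succ m ih =>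
    simp only [Ucount, ih (fun j hj => h j (by omega)), h m (by omega)]

lemma Ucount_set (arr : List Int) (xn : Nat) (v : Int) (hveq : v = (xn : Int))
    (hx : arr.getD xn 0 ≠ (xn : Int))
    (hlen : xn < arr.length) (m : Nat) (hm : xn < m) :
    Ucount (arr.set xn v) m + 1 = Ucount arr m := by
  subst hveq
  induction m with
  | zero => omega
  | succ m ih =>
    simp only [Ucount]
    rcases Nat.lt_or_ge xn m with h | h
    · have := ih h
      have he : (arr.set xn (xn : Int)).getD m 0 = arr.getD m 0 := by
        rw [getD_set', if_neg (fun hh => by omega)]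
      rw [he]; omega
    · have hxm : xn = m := by omega
      subst hxm
      have he : (arr.set xn (xn : Int)).getD xn 0 = (xn : Int) := by
        rw [getD_set', if_pos ⟨rfl, hlen⟩]
      have hc : Ucount (arr.set xn (xn : Int)) xn = Ucount arr xn := by
        refine Ucount_congr _ _ _ (fun j hj => ?_)
        rw [getD_set', if_neg (fun hh => by omega)]
      rw [he, hc, if_neg (not_not_intro rfl), if_pos hx]

lemma Ucount_zero (arr : List Int) (m : Nat) (h : Ucount arr m = 0) :
    ∀ j, j < m → arr.getD j 0 = (j : Int) := by
  induction m with
  | zero => omega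
  | succ m ih =>
    simp only [Ucount] at h
    intro j hj
    rcases Nat.lt_or_ge j m with h1 | h1
    · exact ih (by omega) j h1
    · have : j = m := by omega
      subst this
      by_contra hne
      rw [if_pos hne] at h
      omega

def Spresent (arr₀ : List Int) (n : Nat) (v : Int) : Prop :=
  ∃ p, p < n ∧ arr₀.getD p 0 = v

def ChaseInv (arr₀ : List Int) (n : Nat) (arr : List Int) : Prop :=
  arr.length = arr₀.length ∧
  (∀ j, n ≤ j → arr.getD j 0 = arr₀.getD j 0) ∧
  (∀ j, j < n → arr.getD j 0 = (j : Int) ∨ arr.getD j 0 = arr₀.getD j 0 ∨ arr.getD j 0 = -1) ∧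
  (∀ j, j < n → arr.getD j 0 = (j : Int) → Spresent arr₀ n (j : Int))

def ChasePost (arr₀ : List Int) (n : Nat) (arr : List Int) (x : Int) (out : List Int) : Prop :=
  ChaseInv arr₀ n out ∧
  (∀ v : Nat, v < n →
    (∃ p, p < n ∧ arr₀.getD p 0 = (v : Int) ∧ out.getD p 0 ≠ arr₀.getD p 0) →
    out.getD v 0 = (v : Int)) ∧
  out.getD x.toNat 0 = x ∧
  (∀ j : Nat, out.getD j 0 ≠ arr.getD j 0 → out.getD j 0 = (j : Int) ∧ j < n)

lemma chaseInv_point (arr₀ : List Int) (n : Nat) (a b : List Int)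
    (h : ChaseInv arr₀ n a) (hlen : b.length = a.length)
    (hpt : ∀ j, b.getD j 0 = a.getD j 0) : ChaseInv arr₀ n b := by
  obtain ⟨h1, h2, h3, h4⟩ := h
  exact ⟨by omega, fun j hj => by rw [hpt]; exact h2 j hj,
    fun j hj => by rw [hpt]; exact h3 j hj,
    fun j hj he => h4 j hj (by rw [← hpt]; exact he)⟩

lemma chase_main (arr₀ : List Int) (n : Nat) (size : Int)
    (hn : n ≤ arr₀.length) (hsz : size = (n : Int)) :
    ∀ fuel arr (x : Int),
      ChaseInv arr₀ n arr → 0 ≤ x → x < (n : Int) → Spresent arr₀ n x →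
      (∀ v : Nat, v < n → (v : Int) ≠ x →
        (∃ p, p < n ∧ arr₀.getD p 0 = (v : Int) ∧ arr.getD p 0 ≠ arr₀.getD p 0) →
        arr.getD v 0 = (v : Int)) →
      Ucount arr n ≤ fuel →
      ChasePost arr₀ n arr x ((chaseA size fuel arr x).1.set (chaseA size fuel arr x).2.toNat (chaseA size fuel arr x).2) := by
  intro fuel
  induction fuel with
  | zero =>
    intro arr x hinv hx0 hxn hS hC hU
    obtain ⟨hlen, htail, hV, hFS⟩ := hinv
    have hall : ∀ j, j < n → arr.getD j 0 = (j : Int) :=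
      Ucount_zero arr n (by omega)
    have hxn' : x.toNat < n := by omega
    have hxv : ((x.toNat : Nat) : Int) = x := Int.toNat_of_nonneg hx0
    have hfix : arr.getD x.toNat 0 = x := by rw [hall x.toNat hxn', hxv]
    simp only [chaseA]
    have hpt : ∀ j, (arr.set x.toNat x).getD j 0 = arr.getD j 0 := by
      intro j
      rw [getD_set']
      split
      · next hh => rw [hh.1, hfix]
      · rfl
    have hlen2 : (arr.set x.toNat x).length = arr.length := by simp
    refine ⟨chaseInv_point arr₀ n arr _ ⟨hlen, htail, hV, hFS⟩ hlen2 hpt, ?_, ?_, ?_⟩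
    · intro v hv ⟨p, hp, hpv, hne⟩
      rw [hpt]
      exact hall v hv
    · rw [hpt]; exact hfix
    · intro j hne; rw [hpt] at hne; exact absurd rfl hne
  | succ fuel ih =>
    intro arr x hinv hx0 hxn hS hC hU
    obtain ⟨hlen, htail, hV, hFS⟩ := hinv
    have hxn' : x.toNat < n := by omega
    have hxv : ((x.toNat : Nat) : Int) = x := Int.toNat_of_nonneg hx0
    have hxlen : x.toNat < arr.length := by omega
    simp only [chaseA]
    by_cases hcond : arr.getD x.toNat 0 ≠ -1 ∧ arr.getD x.toNat 0 ≠ x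
    · rw [if_pos hcond]
      -- y = arr[x] = arr₀[x]
      have hy0 : arr.getD x.toNat 0 = arr₀.getD x.toNat 0 := by
        rcases hV x.toNat hxn' with h | h | h
        · exact absurd (h.trans hxv) hcond.2
        · exact h
        · exact absurd h hcond.1
      set y := arr.getD x.toNat 0 with hydef
      have harr1inv : ChaseInv arr₀ n (arr.set x.toNat x) := by
        refine ⟨by simp; omega, ?_, ?_, ?_⟩
        · intro j hj
          rw [getD_set', if_neg (fun hh => by omega)]
          exact htail j hj
        · intro j hj
          rw [getD_set']
          split
          · next hh => left; rw [hh.1, hxv]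
          · exact hV j hj
        · intro j hj
          rw [getD_set']
          split
          · next hh => intro _; rw [hh.1, hxv]; exact hS
          · exact hFS j hj
      have harr1C : ∀ v : Nat, v < n → (v : Int) ≠ y →
          (∃ p, p < n ∧ arr₀.getD p 0 = (v : Int) ∧ (arr.set x.toNat x).getD p 0 ≠ arr₀.getD p 0) →
          (arr.set x.toNat x).getD v 0 = (v : Int) := by
        intro v hv hvy ⟨p, hp, hpv, hne⟩
        by_cases hvx : (v : Int) = x
        · have : v = x.toNat := by omega
          subst this
          rw [getD_set', if_pos ⟨rfl, hxlen⟩, hxv]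
        · have hold : arr.getD p 0 ≠ arr₀.getD p 0 := by
            intro he
            by_cases hpx : p = x.toNat
            · subst hpx
              exact hvy ((hy0.trans hpv).symm)
            · rw [getD_set', if_neg (fun hh => hpx hh.1)] at hne
              exact hne he
          have := hC v hv hvx ⟨p, hp, hpv, hold⟩
          rw [getD_set', if_neg (fun hh => hvx (by rw [← hxv, ← hh.1]))]
          exact this
      by_cases hy : 0 ≤ y ∧ y < size
      · rw [if_pos hy]
        have hUy : Ucount (arr.set x.toNat x) n + 1 = Ucount arr n := by
          refine Ucount_set arr x.toNat x hxv.symm ?_ hxlen n hxn'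
          rw [hxv]; exact hcond.2
        have hpost := ih (arr.set x.toNat x) y harr1inv hy.1 (by omega) ⟨x.toNat, hxn', hy0.symm⟩ harr1C (by omega)
        obtain ⟨hpi, hpc, hpx, hpd⟩ := hpost
        refine ⟨hpi, hpc, ?_, ?_⟩
        · -- out[x] = x
          by_cases hch : ((chaseA size fuel (arr.set x.toNat x) y).1.set (chaseA size fuel (arr.set x.toNat x) y).2.toNat (chaseA size fuel (arr.set x.toNat x) y).2).getD x.toNat 0 = (arr.set x.toNat x).getD x.toNat 0
          · rw [hch, getD_set', if_pos ⟨rfl, hxlen⟩]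
          · rw [(hpd x.toNat hch).1, hxv]
        · intro j hne
          by_cases hch : ((chaseA size fuel (arr.set x.toNat x) y).1.set (chaseA size fuel (arr.set x.toNat x) y).2.toNat (chaseA size fuel (arr.set x.toNat x) y).2).getD j 0 = (arr.set x.toNat x).getD j 0
          · rw [hch] at hne ⊢
            rw [getD_set'] at hne ⊢
            by_cases hjx : j = x.toNat
            · rw [if_pos ⟨hjx, hjx ▸ hxlen⟩, hjx, hxv]
              exact ⟨rfl, hjx ▸ hxn'⟩
            · rw [if_neg (fun hh => hjx hh.1)] at hne
              exact absurd rfl hne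
          · exact hpd j hch
      · rw [if_neg hy]
        -- break branch: out = (arr.set x x).set x x, pointwise = arr.set x x
        have hpt : ∀ j, ((arr.set x.toNat x).set x.toNat x).getD j 0 = (arr.set x.toNat x).getD j 0 := by
          intro j
          rw [getD_set' (arr.set x.toNat x)]
          split
          · next hh => rw [hh.1, getD_set', if_pos ⟨rfl, hxlen⟩]
          · rfl
        refine ⟨chaseInv_point arr₀ n _ _ harr1inv (by simp) hpt, ?_, ?_, ?_⟩
        · intro v hv ⟨p, hp, hpv, hne⟩
          rw [hpt] at hne ⊢
          refine harr1C v hv ?_ ⟨p, hp, hpv, hne⟩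
          intro hvy
          -- v = y would mean y ∈ [0,n), contradicting ¬hy
          apply hy
          constructor
          · rw [← hvy]; exact Int.natCast_nonneg v
          · rw [← hvy, hsz]; exact_mod_cast hv
        · rw [hpt, getD_set', if_pos ⟨rfl, hxlen⟩]
        · intro j hne
          rw [hpt] at hne ⊢
          rw [getD_set'] at hne ⊢
          by_cases hjx : j = x.toNat
          · rw [if_pos ⟨hjx, hjx ▸ hxlen⟩, hjx, hxv]
            exact ⟨rfl, hjx ▸ hxn'⟩
          · rw [if_neg (fun hh => hjx hh.1)] at hne
            exact absurd rfl hne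
    · rw [if_neg hcond]
      -- loop exit: arr[x] = -1 or x; out = arr.set x x
      have hax : arr.getD x.toNat 0 = -1 ∨ arr.getD x.toNat 0 = x := by
        by_cases h1 : arr.getD x.toNat 0 = -1
        · exact Or.inl h1
        · right; by_contra h2; exact hcond ⟨h1, h2⟩
      refine ⟨?_, ?_, ?_, ?_⟩
      · refine ⟨by simp; omega, ?_, ?_, ?_⟩
        · intro j hj
          rw [getD_set', if_neg (fun hh => by omega)]
          exact htail j hj
        · intro j hj
          rw [getD_set']
          split
          · next hh => left; rw [hh.1, hxv]
          · exact hV j hj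
        · intro j hj
          rw [getD_set']
          split
          · next hh => intro _; rw [hh.1, hxv]; exact hS
          · exact hFS j hj
      · intro v hv ⟨p, hp, hpv, hne⟩
        by_cases hvx : (v : Int) = x
        · have : v = x.toNat := by omega
          subst this
          rw [getD_set', if_pos ⟨rfl, hxlen⟩, hxv]
        · have hold : arr.getD p 0 ≠ arr₀.getD p 0 := by
            intro he
            by_cases hpx : p = x.toNat
            · subst hpx
              -- arr[x] = arr₀[x] and arr[x] ∈ {-1, x}: value v = -1 impossible, v = x excluded
              rcases hax with h1 | h1
              · rw [he] at h1; rw [h1] at hpv; omega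
              · exact hvx (hpv.symm.trans (he.symm.trans h1))
            · rw [getD_set', if_neg (fun hh => hpx hh.1)] at hne
              exact hne he
          have := hC v hv hvx ⟨p, hp, hpv, hold⟩
          rw [getD_set', if_neg (fun hh => hvx (by rw [← hxv, ← hh.1]))]
          exact this
      · rw [getD_set', if_pos ⟨rfl, hxlen⟩]
      · intro j hne
        rw [getD_set'] at hne ⊢
        by_cases hjx : j = x.toNat
        · rw [if_pos ⟨hjx, hjx ▸ hxlen⟩, hjx, hxv]
          exact ⟨rfl, hjx ▸ hxn'⟩
        · rw [if_neg (fun hh => hjx hh.1)] at hne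
          exact absurd rfl hne

def InvA (arr₀ : List Int) (n i : Nat) (arr : List Int) : Prop :=
  ChaseInv arr₀ n arr ∧
  (∀ j, j < i → arr.getD j 0 = (j : Int) ∨ arr.getD j 0 = -1) ∧
  (∀ v : Nat, v < n →
    (∃ p, p < n ∧ arr₀.getD p 0 = (v : Int) ∧ arr.getD p 0 ≠ arr₀.getD p 0) →
    arr.getD v 0 = (v : Int))

lemma stepA_inv (arr₀ : List Int) (n : Nat) (size : Int)
    (hn : n ≤ arr₀.length) (hsz : size = (n : Int)) (i : Nat) (hi : i < n)
    (arr : List Int) (h : InvA arr₀ n i arr) :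
    InvA arr₀ n (i + 1) (stepA size arr i) := by
  obtain ⟨⟨hlen, htail, hV, hFS⟩, hproc, hC⟩ := h
  have hilen : i < arr.length := by omega
  unfold stepA
  by_cases hc1 : arr.getD i 0 ≠ -1 ∧ arr.getD i 0 ≠ (i : Int)
  · rw [if_pos hc1]
    have hx : arr.getD i 0 = arr₀.getD i 0 := by
      rcases hV i hi with h | h | h
      · exact absurd h hc1.2
      · exact h
      · exact absurd h hc1.1
    by_cases hr : 0 ≤ arr.getD i 0 ∧ arr.getD i 0 < size
    · rw [if_pos hr]
      have hfuel : Ucount arr n ≤ size.toNat := by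
        have := Ucount_le arr n; omega
      have hpost := chase_main arr₀ n size hn hsz size.toNat arr (arr.getD i 0)
        ⟨hlen, htail, hV, hFS⟩ hr.1 (by omega) ⟨i, hi, hx.symm⟩
        (fun v hv _ hw => hC v hv hw) hfuel
      set out := ((chaseA size size.toNat arr (arr.getD i 0)).1.set
        (chaseA size size.toNat arr (arr.getD i 0)).2.toNat
        (chaseA size size.toNat arr (arr.getD i 0)).2) with hout
      obtain ⟨⟨hlen2, htail2, hV2, hFS2⟩, hC2, hxfix, hdiff⟩ := hpost
      have hproc2 : ∀ j, j < i → out.getD j 0 = (j : Int) ∨ out.getD j 0 = -1 := by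
        intro j hj
        by_cases hch : out.getD j 0 = arr.getD j 0
        · rw [hch]; exact hproc j hj
        · left; exact (hdiff j hch).1
      by_cases hf : out.getD i 0 ≠ (i : Int)
      · rw [if_pos hf]
        have hilen2 : i < out.length := by rw [hlen2]; omega
        refine ⟨⟨by rw [List.length_set]; exact hlen2, ?_, ?_, ?_⟩, ?_, ?_⟩
        · intro j hj
          rw [getD_set', if_neg (fun hh => by omega)]
          exact htail2 j hj
        · intro j hj
          rw [getD_set']
          split
          · next => right; right; rfl
          · exact hV2 j hj
        · intro j hj
          rw [getD_set']
          split
          · intro hc; omega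
          · exact hFS2 j hj
        · intro j hj
          rw [getD_set']
          split
          · next hh => right; rfl
          · next hh =>
              exact hproc2 j (by
                rcases Nat.lt_or_ge j i with h1 | h1
                · exact h1
                · exact absurd ⟨by omega, by rw [hlen2]; omega⟩ hh)
        · -- full C for out.set i (-1)
          intro v hv ⟨p, hp, hpv, hne⟩
          have hvni : v ≠ i := by
            intro hvi
            subst hvi
            -- witness for value v = i would force out[i] = i, contra hf
            apply hf
            by_cases hpi : p = v
            · subst hpi
              -- arr₀[p] = ↑p, but x = arr₀[i] ≠ ↑i
              rw [hx] at hc1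
              exact absurd hpv hc1.2
            · refine hC2 v hv ⟨p, hp, hpv, ?_⟩
              rwa [getD_set', if_neg (fun hh => hpi (by omega))] at hne
          have hvout : out.getD v 0 = (v : Int) := by
            by_cases hpi : p = i
            · subst hpi
              -- value is x = arr₀[i]; chase fixed it
              have hxv2 : (arr.getD p 0).toNat = v := by
                rw [hx, hpv]; omega
              rw [← hxv2, Int.toNat_of_nonneg hr.1]
              exact hxfix
            · refine hC2 v hv ⟨p, hp, hpv, ?_⟩
              rwa [getD_set', if_neg (fun hh => hpi hh.1)] at hne
          rw [getD_set', if_neg (fun hh => hvni hh.1)]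
          exact hvout
      · rw [if_neg hf]
        push_neg at hf
        refine ⟨⟨hlen2, htail2, hV2, hFS2⟩, ?_, hC2⟩
        intro j hj
        rcases Nat.lt_or_ge j i with h1 | h1
        · exact hproc2 j h1
        · have : j = i := by omega
          subst this
          exact Or.inl hf
    · rw [if_neg hr]
      refine ⟨⟨by simp; omega, ?_, ?_, ?_⟩, ?_, ?_⟩
      · intro j hj
        rw [getD_set', if_neg (fun hh => by omega)]
        exact htail j hj
      · intro j hj
        rw [getD_set']
        split
        · next => right; right; rfl
        · exact hV j hj
      · intro j hj
        rw [getD_set']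
        split
        · intro hc; omega
        · exact hFS j hj
      · intro j hj
        rw [getD_set']
        split
        · next => right; rfl
        · next hh =>
          exact hproc j (by
            rcases Nat.lt_or_ge j i with h1 | h1
            · exact h1
            · exact absurd ⟨by omega, by omega⟩ hh)
      · intro v hv ⟨p, hp, hpv, hne⟩
        have hvni : (v : Int) ≠ (i : Int) ∨ True := Or.inr trivial
        by_cases hpi : p = i
        · subst hpi
          -- value x = arr₀[i] = ↑v is in [0, n), contradicting hr
          exfalso
          apply hr
          rw [hx, hpv]
          exact ⟨Int.natCast_nonneg v, by rw [hsz]; exact_mod_cast hv⟩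
        · have hne' : arr.getD p 0 ≠ arr₀.getD p 0 := by
            rwa [getD_set', if_neg (fun hh => hpi hh.1)] at hne
          have hvout := hC v hv ⟨p, hp, hpv, hne'⟩
          have hvi : v ≠ i := by
            intro hvi; subst hvi
            rw [hvout] at hc1
            exact hc1.2 rfl
          rw [getD_set', if_neg (fun hh => hvi hh.1)]
          exact hvout
  · rw [if_neg hc1]
    push_neg at hc1
    refine ⟨⟨hlen, htail, hV, hFS⟩, ?_, hC⟩
    intro j hj
    rcases Nat.lt_or_ge j i with h1 | h1
    · exact hproc j h1
    · have : j = i := by omega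
      subst this
      by_cases h2 : arr.getD j 0 = -1
      · exact Or.inr h2
      · exact Or.inl (hc1 h2)

lemma foldA_inv (arr₀ : List Int) (n : Nat) (size : Int)
    (hn : n ≤ arr₀.length) (hsz : size = (n : Int)) :
    ∀ m, m ≤ n → InvA arr₀ n m ((List.range m).foldl (stepA size) arr₀) := by
  intro m
  induction m with
  | zero =>
    intro _
    refine ⟨⟨rfl, fun j _ => rfl, fun j _ => Or.inr (Or.inl rfl), ?_⟩, fun j hj => by omega, ?_⟩
    · intro j hj he
      exact ⟨j, hj, he⟩
    · intro v hv ⟨p, hp, hpv, hne⟩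
      exact absurd rfl hne
  | succ m ihm =>
    intro hm
    rw [List.range_succ, List.foldl_append]
    exact stepA_inv arr₀ n size hn hsz m (by omega) _ (ihm (by omega))

lemma list_eq_of_getD (a b : List Int) (hlen : a.length = b.length)
    (h : ∀ j, j < a.length → a.getD j 0 = b.getD j 0) : a = b := by
  apply List.ext_getElem hlen
  intro j h1 h2
  have := h j h1
  rwa [List.getD_eq_getElem?_getD, List.getD_eq_getElem?_getD,
    List.getElem?_eq_getElem h1, List.getElem?_eq_getElem h2] at this

def outFun (arr₀ : List Int) (n : Nat) (j : Nat) : Int :=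
  if ∃ p, p < n ∧ arr₀.getD p 0 = (j : Int) then (j : Int) else -1

def outSpec (arr₀ : List Int) (n : Nat) : List Int :=
  (List.range n).map (outFun arr₀ n) ++ arr₀.drop n

lemma outSpec_len (arr₀ : List Int) (n : Nat) (hn : n ≤ arr₀.length) :
    (outSpec arr₀ n).length = arr₀.length := by
  simp [outSpec]; omega

lemma outSpec_getD (arr₀ : List Int) (n : Nat) (hn : n ≤ arr₀.length) (j : Nat)
    (hj : j < arr₀.length) :
    (outSpec arr₀ n).getD j 0 =
      if j < n then (if ∃ p, p < n ∧ arr₀.getD p 0 = (j : Int) then (j : Int) else -1)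
      else arr₀.getD j 0 := by
  unfold outSpec
  rcases Nat.lt_or_ge j n with h1 | h1
  · rw [if_pos h1]
    have hlen' : j < ((List.range n).map (outFun arr₀ n)).length := by
      simpa using h1
    rw [List.getD_append _ _ _ _ hlen', List.getD_eq_getElem _ _ hlen']
    simp only [List.getElem_map, List.getElem_range]
    rfl
  · rw [if_neg (by omega)]
    rw [List.getD_append_right _ _ _ _ (by simpa using h1)]
    simp only [List.length_map, List.length_range]
    rw [List.getD_eq_getElem?_getD, List.getD_eq_getElem?_getD,
      List.getElem?_drop, show n + (j - n) = j from by omega]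

lemma A_eq_outSpec (arr₀ : List Int) (n : Nat) (size : Int)
    (hn : n ≤ arr₀.length) (hn0 : n = size.toNat) (hsz : size = (n : Int)) :
    arrangeUsingIteration arr₀ size = outSpec arr₀ n := by
  have hinv := foldA_inv arr₀ n size hn hsz n (le_refl n)
  obtain ⟨⟨hlen, htail, hV, hFS⟩, hproc, hC⟩ := hinv
  have hfeq : arrangeUsingIteration arr₀ size = (List.range n).foldl (stepA size) arr₀ := by
    unfold arrangeUsingIteration; rw [← hn0]
  rw [hfeq]
  set fin := (List.range n).foldl (stepA size) arr₀ with hfin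
  apply list_eq_of_getD _ _ (by rw [hlen, outSpec_len arr₀ n hn])
  intro j hj
  have hj' : j < arr₀.length := by omega
  rw [outSpec_getD arr₀ n hn j hj']
  rcases Nat.lt_or_ge j n with h1 | h1
  · rw [if_pos h1]
    rcases hproc j h1 with h2 | h2
    · rw [h2, if_pos (show ∃ p, p < n ∧ arr₀.getD p 0 = (j : Int) from hFS j h1 h2)]
    · rw [h2]
      rw [if_neg ?_]
      intro ⟨p, hp, hpv⟩
      have hfix : fin.getD j 0 = (j : Int) := by
        rcases hproc p hp with h3 | h3
        · by_cases hpj : p = j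
          · subst hpj
            exact h3
          · refine hC j h1 ⟨p, hp, hpv, ?_⟩
            rw [h3, hpv]
            intro he
            exact hpj (by omega)
        · refine hC j h1 ⟨p, hp, hpv, ?_⟩
          rw [h3, hpv]
          intro he
          omega
      rw [hfix] at h2
      omega
  · rw [if_neg (show ¬ j < n from by omega)]
    exact htail j h1

lemma mem_present_fold (arr₀ : List Int) (size : Int) :
    ∀ (l : List Nat) (s : PySem.Set Int) (v : Int),
      v ∈ l.foldl (fun s i =>
          if 0 ≤ arr₀.getD i 0 ∧ arr₀.getD i 0 < size then PySem.Set.add s (arr₀.getD i 0) else s) s ↔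
        v ∈ s ∨ ∃ i ∈ l, arr₀.getD i 0 = v ∧ 0 ≤ v ∧ v < size := by
  intro l
  induction l with
  | nil => intro s v; simp
  | cons a t ih =>
    intro s v
    simp only [List.foldl_cons]
    by_cases h : 0 ≤ arr₀.getD a 0 ∧ arr₀.getD a 0 < size
    · rw [if_pos h, ih]
      rw [PySem.Set.mem_add]
      constructor
      · rintro (⟨hs | he⟩ | ⟨i, hi, hiv⟩)
        · exact Or.inl hs
        · exact Or.inr ⟨a, by simp, he.symm, by rw [he]; exact h.1, by rw [he]; exact h.2⟩
        · exact Or.inr ⟨i, by simp [hi], hiv⟩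
      · rintro (hs | ⟨i, hi, hiv⟩)
        · exact Or.inl (Or.inl hs)
        · rcases List.mem_cons.mp hi with rfl | hit
          · exact Or.inl (Or.inr hiv.1.symm)
          · exact Or.inr ⟨i, hit, hiv⟩
    · rw [if_neg h, ih]
      constructor
      · rintro (hs | ⟨i, hi, hiv⟩)
        · exact Or.inl hs
        · exact Or.inr ⟨i, by simp [hi], hiv⟩
      · rintro (hs | ⟨i, hi, hiv⟩)
        · exact Or.inl hs
        · rcases List.mem_cons.mp hi with rfl | hit
          · exact absurd ⟨by rw [hiv.1]; exact hiv.2.1, by rw [hiv.1]; exact hiv.2.2⟩ h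
          · exact Or.inr ⟨i, hit, hiv⟩

lemma foldB_len (g : Nat → Int) :
    ∀ (l : List Nat) (a : List Int),
      (l.foldl (fun acc i => acc.set i (g i)) a).length = a.length := by
  intro l
  induction l with
  | nil => intro a; rfl
  | cons b t ih => intro a; simp only [List.foldl_cons, ih, List.length_set]

lemma foldB_getD (g : Nat → Int) :
    ∀ (m : Nat) (a : List Int) (j : Nat),
      ((List.range m).foldl (fun acc i => acc.set i (g i)) a).getD j 0 =
        if j < m ∧ j < a.length then g j else a.getD j 0 := by
  intro m
  induction m with
  | zero => intro a j; simp
  | succ m ih =>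
    intro a j
    rw [List.range_succ, List.foldl_append]
    simp only [List.foldl_cons, List.foldl_nil]
    rw [getD_set', foldB_len, ih]
    rcases Nat.lt_or_ge j m with h1 | h1
    · rw [if_neg (fun hh => by omega)]
      by_cases h2 : j < a.length
      · rw [if_pos ⟨h1, h2⟩, if_pos ⟨by omega, h2⟩]
      · rw [if_neg (fun hh => h2 hh.2), if_neg (fun hh => h2 hh.2)]
    · by_cases h2 : j = m ∧ j < a.length
      · rw [if_pos h2, if_pos ⟨by omega, h2.2⟩, h2.1]
      · rw [if_neg h2, if_neg (fun hh => by omega)]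
        by_cases h3 : j < a.length
        · rw [if_neg (fun hh => h2 ⟨by omega, h3⟩)]
        · rw [if_neg (fun hh => h3 hh.2)]

lemma B_eq_outSpec (arr₀ : List Int) (n : Nat) (size : Int)
    (hn : n ≤ arr₀.length) (hn0 : n = size.toNat) (hsz : size = (n : Int)) :
    arrangeUsingIteration_alt arr₀ size = outSpec arr₀ n := by
  unfold arrangeUsingIteration_alt
  rw [← hn0]
  apply list_eq_of_getD _ _ (by rw [foldB_len, outSpec_len arr₀ n hn])
  intro j hj
  rw [foldB_len] at hj
  rw [foldB_getD, outSpec_getD arr₀ n hn j hj]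
  rcases Nat.lt_or_ge j n with h1 | h1
  · rw [if_pos ⟨h1, hj⟩, if_pos h1]
    have hmem : (PySem.Set.contains ((List.range n).foldl
        (fun s i => if 0 ≤ arr₀.getD i 0 ∧ arr₀.getD i 0 < size then PySem.Set.add s (arr₀.getD i 0) else s)
        PySem.Set.empty) (j : Int) = true) ↔ ∃ p, p < n ∧ arr₀.getD p 0 = (j : Int) := by
      rw [PySem.Set.contains_iff, mem_present_fold]
      constructor
      · rintro (hs | ⟨i, hi, hiv⟩)
        · exact absurd hs (List.not_mem_nil)
        · exact ⟨i, List.mem_range.mp hi, hiv.1⟩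
      · rintro ⟨p, hp, hpv⟩
        exact Or.inr ⟨p, List.mem_range.mpr hp, hpv, Int.natCast_nonneg j, by rw [hsz]; exact_mod_cast h1⟩
    by_cases hex : ∃ p, p < n ∧ arr₀.getD p 0 = (j : Int)
    · rw [if_pos (hmem.mpr hex), if_pos hex]
    · rw [if_neg (fun hh => hex (hmem.mp hh)), if_neg hex]
  · rw [if_neg (fun hh => by omega), if_neg (by omega)]

-- ===== VERDICT (by name: the statement is the Claim_ definition above) =====
theorem arrangeUsingIteration_spec : Claim_equal_arrangeUsingIteration := by
  intro arr size _hdom hpre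
  unfold Spec_arrangeUsingIteration
  unfold Pre_arrangeUsingIteration at hpre
  by_cases hs : 0 < size
  · have hsz : size = ((size.toNat : Nat) : Int) := by omega
    have hn : size.toNat ≤ arr.length := by omega
    rw [A_eq_outSpec arr size.toNat size hn rfl hsz,
        B_eq_outSpec arr size.toNat size hn rfl hsz]
  · have h0 : size.toNat = 0 := by omega
    simp [arrangeUsingIteration, arrangeUsingIteration_alt, h0]
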